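-- pv_equiv track=rewrite | github.com/Cobrette/i21 | tp5.py | tri_partiel
-- ===== SOURCE A (Python) =====
-- def tri_partiel(T,a,b):
--     cpt=0
--     i=a+1
--     while i<b:
--         j=i
--         while j>a and T[j-1]>T[j]:
--             T[j-1],T[j]=T[j],T[j-1]
--             j-=1
--             cpt+=1
--         cpt+=1
--         i+=1
--     return cpt
-- ===== SOURCE B (Python) =====
-- # B: merge sort counting inversions on the slice T[a:b]; returns inversions + (b-a-1),
-- # and writes the sorted slice back (same in-place mutation as A on the valid domain).
--
-- def _sort_count(xs):
--     if len(xs) <= 1: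
--         return xs, 0
--     m = len(xs) // 2
--     L, il = _sort_count(xs[:m])
--     R, ir = _sort_count(xs[m:])
--     merged = []
--     cross = 0
--     i = j = 0
--     while i < len(L) and j < len(R):
--         if R[j] < L[i]:
--             merged.append(R[j])
--             j += 1
--             cross += len(L) - i
--         else:
--             merged.append(L[i])
--             i += 1
--     merged.extend(L[i:])
--     merged.extend(R[j:])
--     return merged, il + ir + cross
--
-- def tri_partiel(T, a, b):
--     if b <= a + 1:
--         return 0
--     seg, inv = _sort_count(T[a:b])
--     T[a:b] = seg
--     return inv + (b - a - 1)
-- ===== Notes on version B (the rewrite author's own statement) =====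
-- stated objective: alternative
-- what changed: Replaces the in-place insertion sort with swap counting by a merge sort that counts inversions of the slice T[a:b] and returns inversions + (b-a-1), writing the sorted slice back.
-- outside the precondition, e.g. on tri_partiel([2, 1, 3], -1, 2): A returns 5, B returns 2; on tri_partiel([1], 0, 2): A raises IndexError, B returns 1
import Mathlib
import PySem

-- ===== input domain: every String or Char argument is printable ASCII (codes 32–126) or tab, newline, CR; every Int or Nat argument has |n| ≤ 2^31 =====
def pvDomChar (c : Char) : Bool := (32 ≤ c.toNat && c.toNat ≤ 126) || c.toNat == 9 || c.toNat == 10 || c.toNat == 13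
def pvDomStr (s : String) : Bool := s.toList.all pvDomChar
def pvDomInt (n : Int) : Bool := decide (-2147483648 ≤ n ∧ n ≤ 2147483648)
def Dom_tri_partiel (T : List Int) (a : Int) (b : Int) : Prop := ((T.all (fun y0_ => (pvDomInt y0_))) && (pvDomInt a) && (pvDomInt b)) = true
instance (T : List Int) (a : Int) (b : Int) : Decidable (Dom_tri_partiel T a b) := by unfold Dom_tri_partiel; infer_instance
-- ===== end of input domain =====

-- B replaces A's insertion sort with swap counting by a merge sort counting inversions of the slice T[a:b];
-- both sort the slice T[a:b] in place in Python, and the equivalence proved is about the RETURN value.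

-- ===== PORT A =====
-- inner while loop: 'while j>a and T[j-1]>T[j]: swap; j-=1; cpt+=1' — state (T, j, cpt), returns (T, cpt).
-- Python indexing T[j-1]/T[j] is total here only under Pre_ (indices in range); ported with pyGetD/pySetD.
def triA_inner (a : Int) (T : List Int) (j : Int) (cpt : Int) : List Int × Int :=
  if h : a < j ∧ PySem.List.pyGetD T j 0 < PySem.List.pyGetD T (j - 1) 0 then
    triA_inner a
      (PySem.List.pySetD (PySem.List.pySetD T (j - 1) (PySem.List.pyGetD T j 0)) j
        (PySem.List.pyGetD T (j - 1) 0))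
      (j - 1) (cpt + 1)
  else (T, cpt)
termination_by (j - a).toNat
decreasing_by omega

-- outer while loop: 'while i<b: (inner); cpt+=1; i+=1'
def triA_outer (a : Int) (b : Int) (T : List Int) (i : Int) (cpt : Int) : List Int × Int :=
  if h : i < b then
    triA_outer a b (triA_inner a T i cpt).1 (i + 1) ((triA_inner a T i cpt).2 + 1)
  else (T, cpt)
termination_by (b - i).toNat
decreasing_by omega

def tri_partiel (T : List Int) (a : Int) (b : Int) : Int :=
  (triA_outer a b T (a + 1) 0).2

-- ===== PORT B =====
-- merge of two runs, counting cross pairs: when R's head is taken, cross += len(L) - i (remaining left run).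
def mergeCount : List Int → List Int → List Int × Int
  | [], R => (R, 0)
  | l :: L, [] => (l :: L, 0)
  | l :: L, r :: R =>
    if r < l then
      ((r :: (mergeCount (l :: L) R).1), (mergeCount (l :: L) R).2 + ((l :: L).length : Int))
    else
      ((l :: (mergeCount L (r :: R)).1), (mergeCount L (r :: R)).2)
termination_by L R => L.length + R.length

-- _sort_count: merge sort returning (sorted list, inversion count); xs[:m]/xs[m:] with 0 ≤ m ≤ len(xs) is take/drop (exact).
def sortCount (xs : List Int) : List Int × Int :=
  if h : xs.length ≤ 1 then (xs, 0)
  else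
    ((mergeCount (sortCount (xs.take (xs.length / 2))).1 (sortCount (xs.drop (xs.length / 2))).1).1,
      (sortCount (xs.take (xs.length / 2))).2 + (sortCount (xs.drop (xs.length / 2))).2 +
        (mergeCount (sortCount (xs.take (xs.length / 2))).1 (sortCount (xs.drop (xs.length / 2))).1).2)
termination_by xs.length
decreasing_by
  · simp; omega
  · simp; omega

def tri_partiel_alt (T : List Int) (a : Int) (b : Int) : Int :=
  if b ≤ a + 1 then 0
  else (sortCount (PySem.List.slice T (some a) (some b))).2 + (b - a - 1)

-- ===== PRECONDITION & SPEC =====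
-- Pre_ excludes only nontrivial ranges (b > a+1) with a < 0 — where A's comparisons wrap around via Python
-- negative indexing, an accidental corner no caller of a partial sort would specify — or with b > len(T),
-- where A raises IndexError.
def Pre_tri_partiel (T : List Int) (a : Int) (b : Int) : Prop :=
  b ≤ a + 1 ∨ (0 ≤ a ∧ b ≤ (T.length : Int))
instance (T : List Int) (a : Int) (b : Int) : Decidable (Pre_tri_partiel T a b) := by
  unfold Pre_tri_partiel; infer_instance

def pvWitness_tri_partiel : List Int × Int × Int := ([3, 1, 2], 0, 3)

def Spec_tri_partiel (T : List Int) (a : Int) (b : Int) (out : Int) : Prop := out = tri_partiel_alt T a b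
instance (T : List Int) (a : Int) (b : Int) (out : Int) : Decidable (Spec_tri_partiel T a b out) := by unfold Spec_tri_partiel; infer_instance

-- ===== CLAIM (what is proved, stated in full; the proofs are below) =====
def Claim_equal_tri_partiel : Prop := ∀ (T : List Int) (a : Int) (b : Int), Dom_tri_partiel T a b → Pre_tri_partiel T a b → Spec_tri_partiel T a b (tri_partiel T a b)

-- ===== LEMMAS AND PROOFS =====

def crossCnt (L : List Int) : List Int → Nat
  | [] => 0
  | y :: R => L.countP (fun x => decide (y < x)) + crossCnt L R

def invCnt : List Int → Nat
  | [] => 0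
  | x :: xs => xs.countP (fun y => decide (y < x)) + invCnt xs

lemma crossCnt_nil_left (R : List Int) : crossCnt [] R = 0 := by
  induction R with
  | nil => rfl
  | cons y R ih => simp [crossCnt, ih]

lemma crossCnt_cons_left (l : Int) (L R : List Int) :
    crossCnt (l :: L) R = R.countP (fun y => decide (y < l)) + crossCnt L R := by
  induction R with
  | nil => rfl
  | cons y R ih => simp [crossCnt, ih, List.countP_cons]; omega

lemma crossCnt_append_left (L₁ L₂ R : List Int) :
    crossCnt (L₁ ++ L₂) R = crossCnt L₁ R + crossCnt L₂ R := by
  induction R with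
  | nil => rfl
  | cons y R ih => simp [crossCnt, ih, List.countP_append]; omega

lemma crossCnt_perm_left {L L' : List Int} (h : L.Perm L') (R : List Int) :
    crossCnt L R = crossCnt L' R := by
  induction R with
  | nil => rfl
  | cons y R ih => simp [crossCnt, ih, h.countP_eq]

lemma crossCnt_eq_sum (L R : List Int) :
    crossCnt L R = (R.map (fun y => L.countP (fun x => decide (y < x)))).sum := by
  induction R with
  | nil => rfl
  | cons y R ih => simp [crossCnt, ih]

lemma crossCnt_perm_right {R R' : List Int} (L : List Int) (h : R.Perm R') :
    crossCnt L R = crossCnt L R' := by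
  rw [crossCnt_eq_sum, crossCnt_eq_sum, (h.map _).sum_eq]

lemma invCnt_append (L R : List Int) :
    invCnt (L ++ R) = invCnt L + invCnt R + crossCnt L R := by
  induction L with
  | nil => simp [invCnt, crossCnt_nil_left]
  | cons l L ih =>
    simp [invCnt, ih, List.countP_append, crossCnt_cons_left]
    omega

lemma mergeCount_spec (L R : List Int) (hL : L.Pairwise (· ≤ ·)) (hR : R.Pairwise (· ≤ ·)) :
    (mergeCount L R).1.Perm (L ++ R) ∧ (mergeCount L R).1.Pairwise (· ≤ ·) ∧
      (mergeCount L R).2 = (crossCnt L R : Int) := by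
  fun_induction mergeCount L R with
  | case1 R => simp [crossCnt_nil_left, hR]
  | case2 l L => simp [crossCnt, hL]
  | case3 l L r R hlt ih =>
    rcases List.pairwise_cons.1 hR with ⟨hr, hR'⟩
    rcases ih hL hR' with ⟨hperm, hsort, hcnt⟩
    refine ⟨?_, ?_, ?_⟩
    · exact (hperm.cons r).trans (List.perm_middle).symm
    · refine List.pairwise_cons.2 ⟨?_, hsort⟩
      intro y hy
      have hmem := hperm.mem_iff.1 hy
      rcases List.mem_append.1 hmem with h1 | h2
      · rcases List.mem_cons.1 h1 with rfl | h3
        · omega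
        · have := (List.pairwise_cons.1 hL).1 y h3; omega
      · exact hr y h2
    · have hall : (l :: L).countP (fun x => decide (r < x)) = (l :: L).length := by
        apply List.countP_eq_length.2
        intro y hy
        rcases List.mem_cons.1 hy with rfl | h3
        · simpa using hlt
        · have := (List.pairwise_cons.1 hL).1 y h3; simp; omega
      simp [crossCnt, hcnt, hall]
      push_cast; ring
  | case4 l L r R hlt ih =>
    rcases List.pairwise_cons.1 hL with ⟨hl, hL'⟩
    rcases ih hL' hR with ⟨hperm, hsort, hcnt⟩
    refine ⟨?_, ?_, ?_⟩
    · simpa using hperm.cons l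
    · refine List.pairwise_cons.2 ⟨?_, hsort⟩
      intro y hy
      have hmem := hperm.mem_iff.1 hy
      rcases List.mem_append.1 hmem with h1 | h2
      · exact hl y h1
      · rcases List.mem_cons.1 h2 with rfl | h3
        · omega
        · have := (List.pairwise_cons.1 hR).1 y h3; omega
    · have hz : (r :: R).countP (fun y => decide (y < l)) = 0 := by
        apply List.countP_eq_zero.2
        intro y hy
        rcases List.mem_cons.1 hy with rfl | h3
        · simp; omega
        · have := (List.pairwise_cons.1 hR).1 y h3; simp; omega
      rw [crossCnt_cons_left]
      simp [hcnt, hz]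

lemma sortCount_spec (xs : List Int) :
    (sortCount xs).1.Perm xs ∧ (sortCount xs).1.Pairwise (· ≤ ·) ∧
      (sortCount xs).2 = (invCnt xs : Int) := by
  fun_induction sortCount xs with
  | case1 xs h =>
    refine ⟨List.Perm.refl _, ?_, ?_⟩
    · match xs, h with
      | [], _ => simp
      | [x], _ => simp
    · match xs, h with
      | [], _ => simp [invCnt]
      | [x], _ => simp [invCnt]
  | case2 xs h ih1 ih2 =>
    rcases ih1 with ⟨p1, s1, c1⟩
    rcases ih2 with ⟨p2, s2, c2⟩
    rcases mergeCount_spec _ _ s1 s2 with ⟨pm, sm, cm⟩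
    refine ⟨?_, sm, ?_⟩
    · exact pm.trans ((p1.append p2).trans (by rw [List.take_append_drop]))
    · have hx : invCnt xs = invCnt (xs.take (xs.length / 2)) + invCnt (xs.drop (xs.length / 2))
          + crossCnt (xs.take (xs.length / 2)) (xs.drop (xs.length / 2)) := by
        conv_lhs => rw [← List.take_append_drop (xs.length / 2) xs]
        exact invCnt_append _ _
      have hcr : crossCnt (sortCount (xs.take (xs.length / 2))).1 (sortCount (xs.drop (xs.length / 2))).1
          = crossCnt (xs.take (xs.length / 2)) (xs.drop (xs.length / 2)) := by
        rw [crossCnt_perm_left p1, crossCnt_perm_right _ p2]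
      rw [cm, hcr, c1, c2, hx]
      push_cast; ring

def insR (x : Int) : List Int → List Int × Int
  | [] => ([x], 0)
  | p :: ps => if x < p then ((p :: (insR x ps).1), (insR x ps).2 + 1) else (x :: p :: ps, 0)

def stepIns (s : List Int × Int) (y : Int) : List Int × Int :=
  ((insR y s.1).1, s.2 + (insR y s.1).2 + 1)

lemma insR_perm (x : Int) (r : List Int) : (insR x r).1.Perm (x :: r) := by
  induction r with
  | nil => simp [insR]
  | cons p ps ih =>
    by_cases h : x < p
    · simpa [insR, h] using ((ih.cons p).trans (List.Perm.swap x p ps))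
    · simp [insR, h]

lemma insR_length (x : Int) (r : List Int) : (insR x r).1.length = r.length + 1 := by
  simpa using (insR_perm x r).length_eq


lemma insR_pairwise (x : Int) (r : List Int) (hr : r.Pairwise (· ≥ ·)) :
    (insR x r).1.Pairwise (· ≥ ·) := by
  induction r with
  | nil => simp [insR]
  | cons p ps ih =>
    rcases List.pairwise_cons.1 hr with ⟨hp, hps⟩
    by_cases h : x < p
    · have hins := ih hps
      simp only [insR, h, if_pos]
      refine List.pairwise_cons.2 ⟨?_, hins⟩
      intro y hy
      have hmem := List.mem_cons.1 ((insR_perm x ps).mem_iff.1 hy)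
      rcases hmem with h1 | h2
      · subst h1; exact le_of_lt h
      · exact hp y h2
    · simp only [insR, h, if_neg, not_false_iff]
      refine List.pairwise_cons.2 ⟨?_, hr⟩
      intro y hy
      rcases List.mem_cons.1 hy with h1 | h2
      · subst h1; omega
      · have := hp y h2; omega

lemma insR_snd (x : Int) (r : List Int) (hr : r.Pairwise (· ≥ ·)) :
    (insR x r).2 = (r.countP (fun p => decide (x < p)) : Int) := by
  induction r with
  | nil => simp [insR]
  | cons p ps ih =>
    rcases List.pairwise_cons.1 hr with ⟨hp, hps⟩
    by_cases h : x < p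
    · simp [insR, h, ih hps]
    · have hz : ps.countP (fun p => decide (x < p)) = 0 := by
        apply List.countP_eq_zero.2
        intro y hy
        have := hp y hy
        simp; omega
      simp [insR, h, hz]

lemma getD_append_length (pre : List Int) (y : Int) (ys : List Int) (d : Int) :
    (pre ++ y :: ys).getD pre.length d = y := by
  induction pre with
  | nil => rfl
  | cons p pre ih => simpa using ih

lemma set_append_length (pre : List Int) (y v : Int) (ys : List Int) :
    (pre ++ y :: ys).set pre.length v = pre ++ v :: ys := by
  induction pre with
  | nil => rfl
  | cons p pre ih => simp [ih]

lemma pyGetD_at (pre : List Int) (y : Int) (ys : List Int) (i : Int)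
    (hi : i = (pre.length : Int)) :
    PySem.List.pyGetD (pre ++ y :: ys) i 0 = y := by
  subst hi
  rw [PySem.List.pyGetD_natCast]
  exact getD_append_length pre y ys 0

lemma pySetD_at (pre : List Int) (y v : Int) (ys : List Int) (i : Int)
    (hi : i = (pre.length : Int)) :
    PySem.List.pySetD (pre ++ y :: ys) i v = pre ++ v :: ys := by
  subst hi
  rw [PySem.List.pySetD_natCast]
  exact set_append_length pre y v ys

lemma inner_eq (P : List Int) (x : Int) (r : List Int) : ∀ (Q : List Int) (cpt : Int),
    triA_inner (P.length : Int) (P ++ (r.reverse ++ x :: Q)) ((P.length : Int) + r.length) cpt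
      = (P ++ ((insR x r).1.reverse ++ Q), cpt + (insR x r).2) := by
  induction r with
  | nil =>
    intro Q cpt
    rw [triA_inner]
    simp [insR]
  | cons p ps ih =>
    intro Q cpt
    have hT : P ++ ((p :: ps).reverse ++ x :: Q) = (P ++ ps.reverse) ++ p :: x :: Q := by
      simp
    have hj1 : (P.length : Int) + ((p :: ps).length : Int) - 1 = ((P ++ ps.reverse).length : Int) := by
      simp <;> omega
    have hj : (P.length : Int) + ((p :: ps).length : Int) = (((P ++ ps.reverse) ++ [p]).length : Int) := by
      simp <;> omega
    have hget1 : PySem.List.pyGetD (P ++ ((p :: ps).reverse ++ x :: Q)) ((P.length : Int) + ((p :: ps).length : Int) - 1) 0 = p := by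
      rw [hT]; exact pyGetD_at _ p _ _ hj1
    have hget2 : PySem.List.pyGetD (P ++ ((p :: ps).reverse ++ x :: Q)) ((P.length : Int) + ((p :: ps).length : Int)) 0 = x := by
      have heq : (P ++ ps.reverse) ++ p :: x :: Q = ((P ++ ps.reverse) ++ [p]) ++ x :: Q := by simp
      rw [hT, heq]; exact pyGetD_at _ x _ _ hj
    rw [triA_inner]
    by_cases h : x < p
    · rw [dif_pos ⟨by simp <;> omega, by rw [hget1, hget2]; exact h⟩]
      have hset1 : PySem.List.pySetD (P ++ ((p :: ps).reverse ++ x :: Q)) ((P.length : Int) + ((p :: ps).length : Int) - 1)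
          (PySem.List.pyGetD (P ++ ((p :: ps).reverse ++ x :: Q)) ((P.length : Int) + ((p :: ps).length : Int)) 0)
          = (P ++ ps.reverse) ++ x :: x :: Q := by
        rw [hget2, hT]; exact pySetD_at _ p x _ _ hj1
      have hset2 : PySem.List.pySetD ((P ++ ps.reverse) ++ x :: x :: Q) ((P.length : Int) + ((p :: ps).length : Int))
          (PySem.List.pyGetD (P ++ ((p :: ps).reverse ++ x :: Q)) ((P.length : Int) + ((p :: ps).length : Int) - 1) 0)
          = (P ++ ps.reverse) ++ x :: p :: Q := by
        rw [hget1]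
        have heq : (P ++ ps.reverse) ++ x :: x :: Q = ((P ++ ps.reverse) ++ [x]) ++ x :: Q := by simp
        rw [heq]
        have hj' : (P.length : Int) + ((p :: ps).length : Int) = (((P ++ ps.reverse) ++ [x]).length : Int) := by
          simp <;> omega
        rw [pySetD_at _ x p _ _ hj']
        simp
      rw [hset1, hset2]
      have harg : (P ++ ps.reverse) ++ x :: p :: Q = P ++ (ps.reverse ++ x :: (p :: Q)) := by simp
      have hidx : (P.length : Int) + ((p :: ps).length : Int) - 1 = (P.length : Int) + (ps.length : Int) := by
        simp <;> omega
      rw [harg, hidx, ih (p :: Q) (cpt + 1)]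
      simp only [insR, h, if_pos]
      rw [Prod.mk.injEq]
      constructor
      · simp
      · ring
    · rw [dif_neg (by rintro ⟨h1, h2⟩; rw [hget1, hget2] at h2; exact h h2)]
      simp only [insR, h, if_neg, not_false_iff]
      simp

lemma outer_eq (P : List Int) (ys : List Int) : ∀ (r Q : List Int) (cpt : Int),
    triA_outer (P.length : Int) ((P.length : Int) + r.length + ys.length)
        (P ++ (r.reverse ++ (ys ++ Q))) ((P.length : Int) + r.length) cpt
      = (P ++ ((ys.foldl stepIns (r, cpt)).1.reverse ++ Q), (ys.foldl stepIns (r, cpt)).2) := by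
  induction ys with
  | nil =>
    intro r Q cpt
    rw [triA_outer]
    simp
  | cons y ys ih =>
    intro r Q cpt
    rw [triA_outer, dif_pos (by simp only [List.length_cons]; push_cast; omega)]
    have harg : P ++ (r.reverse ++ (y :: ys ++ Q)) = P ++ (r.reverse ++ y :: (ys ++ Q)) := by simp
    rw [harg, inner_eq P y r (ys ++ Q) cpt]
    have hlen : (P.length : Int) + (r.length : Int) + 1 = (P.length : Int) + ((insR y r).1.length : Int) := by
      rw [insR_length]; push_cast; try omega
    have hb : (P.length : Int) + (r.length : Int) + ((y :: ys).length : Int)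
        = (P.length : Int) + ((insR y r).1.length : Int) + (ys.length : Int) := by
      rw [insR_length]; simp only [List.length_cons]; push_cast; omega
    rw [hb, hlen, ih (insR y r).1 Q (cpt + (insR y r).2 + 1)]
    simp [stepIns]

lemma foldl_step_snd (ys : List Int) : ∀ (r P0 : List Int) (cpt : Int),
    r.Pairwise (· ≥ ·) → r.Perm P0 →
    (ys.foldl stepIns (r, cpt)).2 = cpt + ys.length + (invCnt ys : Int) + (crossCnt P0 ys : Int) := by
  induction ys with
  | nil => intro r P0 cpt _ _; simp [invCnt, crossCnt]
  | cons y ys ih =>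
    intro r P0 cpt hr hperm
    have hstep : stepIns (r, cpt) y = ((insR y r).1, cpt + (insR y r).2 + 1) := rfl
    have hcnt : (insR y r).2 = (P0.countP (fun p => decide (y < p)) : Int) := by
      rw [insR_snd y r hr, hperm.countP_eq]
    have hr' : (insR y r).1.Pairwise (· ≥ ·) := insR_pairwise y r hr
    have hperm' : (insR y r).1.Perm (P0 ++ [y]) := by
      exact (insR_perm y r).trans ((hperm.cons y).trans (List.perm_append_singleton y P0).symm)
    rw [List.foldl_cons, hstep, ih _ _ _ hr' hperm']
    have hx : crossCnt (P0 ++ [y]) ys = crossCnt P0 ys + ys.countP (fun z => decide (z < y)) := by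
      rw [crossCnt_append_left]
      have : crossCnt [y] ys = ys.countP (fun z => decide (z < y)) := by
        rw [crossCnt_cons_left, crossCnt_nil_left]
        simp
      omega
    rw [hcnt]
    simp only [invCnt, crossCnt, hx, List.length_cons]
    push_cast; omega


lemma tri_partiel_trivial (T : List Int) (a b : Int) (h : b ≤ a + 1) :
    tri_partiel T a b = 0 := by
  rw [tri_partiel, triA_outer, dif_neg (by omega)]

lemma tri_partiel_main (T : List Int) (a b : Int) (h0 : 0 ≤ a) (hb : b ≤ (T.length : Int))
    (hab : a + 1 < b) : tri_partiel T a b = tri_partiel_alt T a b := by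
  have h0b : 0 ≤ b := by omega
  have e1 : ((b.toNat : Int)) = b := Int.toNat_of_nonneg h0b
  have e2 : ((a.toNat : Int)) = a := Int.toNat_of_nonneg h0
  obtain ⟨seg, hsegdef⟩ : ∃ seg, seg = PySem.List.slice T (some a) (some b) := ⟨_, rfl⟩
  have hseg : seg = (T.drop a.toNat).take (b.toNat - a.toNat) := by
    rw [hsegdef]; exact PySem.List.slice_toNat T h0 h0b
  have hlseg : seg.length = b.toNat - a.toNat := by
    rw [hseg]; simp only [List.length_take, List.length_drop]; omega
  have hlen2 : 2 ≤ seg.length := by omega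
  obtain ⟨s0, tail, hseg'⟩ : ∃ s0 tail, seg = s0 :: tail := by
    cases hx : seg with
    | nil => rw [hx] at hlen2; simp at hlen2
    | cons s0 t => exact ⟨s0, t, rfl⟩
  have hPlen : (T.take a.toNat).length = a.toNat := by simp; omega
  have hsplit : T = T.take a.toNat ++ (seg ++ T.drop b.toNat) := by
    rw [hseg]
    conv_lhs => rw [← List.take_append_drop a.toNat T]
    congr 1
    conv_lhs => rw [← List.take_append_drop (b.toNat - a.toNat) (T.drop a.toNat)]
    congr 1
    rw [List.drop_drop]
    congr 1
    omega
  have ha : a = ((T.take a.toNat).length : Int) := by rw [hPlen]; omega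
  have hT' : T = T.take a.toNat ++ ([s0].reverse ++ (tail ++ T.drop b.toNat)) := by
    conv_lhs => rw [hsplit, hseg']
    simp
  have hi : a + 1 = ((T.take a.toNat).length : Int) + (([s0] : List Int).length : Int) := by
    rw [hPlen]; simp only [List.length_cons, List.length_nil]; omega
  have hlsegI : (seg.length : Int) = b - a := by rw [hlseg]; omega
  have htail : (tail.length : Int) = b - a - 1 := by
    have h1 : seg.length = tail.length + 1 := by rw [hseg']; simp
    omega
  have hbb : b = ((T.take a.toNat).length : Int) + (([s0] : List Int).length : Int) + (tail.length : Int) := by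
    rw [hPlen]; simp only [List.length_cons, List.length_nil]; omega
  rw [tri_partiel]
  have hout := outer_eq (T.take a.toNat) tail [s0] (T.drop b.toNat) 0
  rw [← hbb, ← hi, ← ha, ← hT'] at hout
  rw [hout]
  rw [foldl_step_snd tail [s0] [s0] 0 (by simp) (List.Perm.refl _)]
  have hcross : crossCnt [s0] tail = tail.countP (fun z => decide (z < s0)) := by
    rw [crossCnt_cons_left, crossCnt_nil_left]
    simp
  have hinv : invCnt seg = tail.countP (fun z => decide (z < s0)) + invCnt tail := by
    rw [hseg']; rfl
  rw [tri_partiel_alt, if_neg (by omega), ← hsegdef]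
  rw [(sortCount_spec seg).2.2]
  rw [hcross, hinv]
  push_cast
  omega

-- ===== VERDICT (by name: the statement is the Claim_ definition above) =====
theorem tri_partiel_spec : Claim_equal_tri_partiel := by
  intro T a b _hdom hpre
  unfold Spec_tri_partiel
  by_cases h : b ≤ a + 1
  · rw [tri_partiel_trivial T a b h, tri_partiel_alt, if_pos h]
  · rcases hpre with h' | ⟨h0, hb⟩
    · omega
    · exact tri_partiel_main T a b h0 hb (by omega)
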